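-- pv_equiv track=rewrite | github.com/aruaru0/golang_myatcoder | ETC/PAST018/G/t.py | can_match_with_two_swaps
-- ===== SOURCE A (Python) =====
-- def can_match_with_two_swaps(N, A, B):
--     from collections import Counter
--
--     # 要素の出現数が一致しなければ一致不可能
--     if Counter(A) != Counter(B):
--         return "No"
--
--     # 差分があるインデックスだけ見る
--     diff_indices = [i for i in range(N) if A[i] != B[i]]
--
--     # 差分が0: すでに一致 → swap不可
--     # 差分が2以下: swap1回で一致する可能性しかない → No
--     # 差分が4以下ならswap2回で一致する可能性あり
--     if len(diff_indices) > 4: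
--         return "No"
--
--     from itertools import combinations
--
--     # 差分部分のインデックスに絞って、2回のswapを全て試す
--     for i in range(N - 1):
--         for j in range(i + 1, N - 1):
--             A_copy = A[:]
--             # swap1
--             A_copy[i], A_copy[i + 1] = A_copy[i + 1], A_copy[i]
--             # swap2
--             A_copy[j], A_copy[j + 1] = A_copy[j + 1], A_copy[j]
--             if A_copy == B:
--                 return "Yes"
--
--     return "No"
-- ===== SOURCE B (Python) =====
-- def can_match_with_two_swaps(N, A, B):
--     # sort-and-compare multiset check, then O(N) scan: candidate swap positions are
--     # restricted to a constant-size neighborhood of the differing indices, plus the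
--     # first and last "no-op" positions.
--     if sorted(A) != sorted(B):
--         return "No"
--     diffs = [i for i in range(N) if A[i] != B[i]]
--     if len(diffs) > 4:
--         return "No"
--     noops = [i for i in range(N - 1) if A[i] == A[i + 1]]
--     cand = set()
--     for d in diffs:
--         for k in range(d - 2, d + 3):
--             if 0 <= k <= N - 2:
--                 cand.add(k)
--     if noops:
--         cand.add(noops[0])
--         cand.add(noops[-1])
--     cand = sorted(cand)
--     for x in range(len(cand)):
--         for y in range(x + 1, len(cand)):
--             i, j = cand[x], cand[y]
--             C = A[:]
--             C[i], C[i + 1] = C[i + 1], C[i]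
--             C[j], C[j + 1] = C[j + 1], C[j]
--             if C == B:
--                 return "Yes"
--     return "No"
-- ===== Notes on version B (the rewrite author's own statement) =====
-- stated objective: alternative
-- what changed: A tries every ordered pair of adjacent-swap positions over the whole array; B checks the multiset by sorting, computes the differing indices (more than 4 means No), and tries pairs only from a constant-size candidate set: positions within distance 2 of a differing index plus the first and last positions with equal adjacent values.
import Mathlib
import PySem

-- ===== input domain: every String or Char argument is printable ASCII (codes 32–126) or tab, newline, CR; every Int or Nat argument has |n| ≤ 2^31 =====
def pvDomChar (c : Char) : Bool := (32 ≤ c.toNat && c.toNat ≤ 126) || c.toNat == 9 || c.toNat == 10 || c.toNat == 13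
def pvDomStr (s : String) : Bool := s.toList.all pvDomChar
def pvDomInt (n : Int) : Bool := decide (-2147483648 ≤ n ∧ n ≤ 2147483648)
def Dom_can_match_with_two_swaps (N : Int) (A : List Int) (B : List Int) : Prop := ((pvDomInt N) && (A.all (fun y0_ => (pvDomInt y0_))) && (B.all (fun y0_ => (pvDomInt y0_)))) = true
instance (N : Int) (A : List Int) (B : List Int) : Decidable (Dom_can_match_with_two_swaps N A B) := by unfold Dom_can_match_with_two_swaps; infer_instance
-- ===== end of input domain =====

-- B replaces A's scan over all ordered pairs of adjacent-swap positions by a sort-based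
-- multiset check plus one linear scan: candidate swap positions are confined to a
-- constant-size neighborhood of the (at most 4) differing indices plus the first and
-- last equal-adjacent ("no-op") positions.

-- ===== PORT A =====

-- A_copy = A[:]; A_copy[i], A_copy[i+1] = A_copy[i+1], A_copy[i]
def pvSwap (l : List Int) (i : Int) : List Int :=
  PySem.List.pySetD (PySem.List.pySetD l i (PySem.List.pyGetD l (i+1) 0)) (i+1) (PySem.List.pyGetD l i 0)

-- swap at i, then at j, compare with B   (shared by both ports: both sources contain exactly this block)
def pvTry (A B : List Int) (i j : Int) : Bool := pvSwap (pvSwap A i) j == B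

def can_match_with_two_swaps (N : Int) (A : List Int) (B : List Int) : String :=
  -- Counter(A) != Counter(B): Counter equality is exactly multiset equality (count equality for every key)
  if ¬ A.Perm B then "No"
  else
    let diffs := (PySem.List.pyRange 0 N 1).filter
      (fun i => !(PySem.List.pyGetD A i 0 == PySem.List.pyGetD B i 0))
    if diffs.length > 4 then "No"
    else if (PySem.List.pyRange 0 (N-1) 1).any (fun i =>
           (PySem.List.pyRange (i+1) (N-1) 1).any (fun j => pvTry A B i j))
      then "Yes" else "No"

-- ===== PORT B =====

def can_match_with_two_swaps_alt (N : Int) (A : List Int) (B : List Int) : String :=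
  -- sorted(A) != sorted(B): multiset pre-check
  if ¬ (PySem.List.sorted A (fun x => x) false = PySem.List.sorted B (fun x => x) false) then "No"
  else
  let diffs := (PySem.List.pyRange 0 N 1).filter
      (fun i => !(PySem.List.pyGetD A i 0 == PySem.List.pyGetD B i 0))
  if diffs.length > 4 then "No"
  else
    let noops := (PySem.List.pyRange 0 (N-1) 1).filter
      (fun i => PySem.List.pyGetD A i 0 == PySem.List.pyGetD A (i+1) 0)
    let cand0 : PySem.Set Int := diffs.foldl (fun s d =>
        (PySem.List.pyRange (d-2) (d+3) 1).foldl (fun s k =>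
           if 0 ≤ k ∧ k ≤ N-2 then PySem.Set.add s k else s) s) PySem.Set.empty
    let cand1 : PySem.Set Int := match noops with
      | [] => cand0
      | h :: _ => PySem.Set.add (PySem.Set.add cand0 h) (PySem.List.pyGetD noops (-1) 0)
    let cand := PySem.List.sorted cand1 (fun x => x) false
    if (PySem.List.pyRange 0 cand.length 1).any (fun x =>
        (PySem.List.pyRange (x+1) cand.length 1).any (fun y =>
          pvTry A B (PySem.List.pyGetD cand x 0) (PySem.List.pyGetD cand y 0)))
    then "Yes" else "No"

-- ===== PRECONDITION & SPEC =====
-- Pre_ is exactly where the Python A returns: if the multisets differ A answers "No" for any N;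
-- otherwise (equal multisets force equal lengths) A indexes positions 0..N-1 and raises IndexError
-- unless N ≤ len(A).
def Pre_can_match_with_two_swaps (N : Int) (A : List Int) (B : List Int) : Prop :=
  (¬ A.Perm B) ∨ N ≤ (A.length : Int)
instance (N : Int) (A : List Int) (B : List Int) : Decidable (Pre_can_match_with_two_swaps N A B) := by
  unfold Pre_can_match_with_two_swaps; infer_instance

def pvWitness_can_match_with_two_swaps : Int × List Int × List Int := (4, [1,2,3,4], [2,1,4,3])

def Spec_can_match_with_two_swaps (N : Int) (A : List Int) (B : List Int) (out : String) : Prop := out = can_match_with_two_swaps_alt N A B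
instance (N : Int) (A : List Int) (B : List Int) (out : String) : Decidable (Spec_can_match_with_two_swaps N A B out) := by unfold Spec_can_match_with_two_swaps; infer_instance

-- ===== CLAIM (what is proved, stated in full; the proofs are below) =====
def Claim_equal_can_match_with_two_swaps : Prop := ∀ (N : Int) (A : List Int) (B : List Int), Dom_can_match_with_two_swaps N A B → Pre_can_match_with_two_swaps N A B → Spec_can_match_with_two_swaps N A B (can_match_with_two_swaps N A B)

-- ===== LEMMAS AND PROOFS =====

-- Nat-level view of the swap machinery
def nswap (l : List Int) (i : Nat) : List Int :=
  (l.set i (l.getD (i+1) 0)).set (i+1) (l.getD i 0)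

def ndouble (l : List Int) (i j : Nat) : List Int := nswap (nswap l i) j

-- "no-op position": adjacent equal values
def pvNp (A : List Int) (M : Nat) (k : Nat) : Prop := k + 1 < M ∧ A.getD k 0 = A.getD (k+1) 0

-- a successful ordered pair of adjacent swaps
def pvGoodN (A B : List Int) (M : Nat) (i j : Nat) : Prop := i < j ∧ j + 1 < M ∧ ndouble A i j = B

-- near a differing index (within distance 2)
def pvNearD (A B : List Int) (M : Nat) (k : Nat) : Prop :=
  ∃ d : Nat, d < M ∧ A.getD d 0 ≠ B.getD d 0 ∧ d ≤ k + 2 ∧ k ≤ d + 2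

theorem pvSwap_eq_nswap (l : List Int) (i : Int) (h : 0 ≤ i) :
    pvSwap l i = nswap l i.toNat := by
  have h1 : (0:Int) ≤ i + 1 := by omega
  have h2 : (i+1).toNat = i.toNat + 1 := by omega
  simp [pvSwap, nswap, PySem.List.pySetD_of_nonneg _ _ h, PySem.List.pySetD_of_nonneg _ _ h1,
    PySem.List.pyGetD_of_nonneg _ _ h, PySem.List.pyGetD_of_nonneg _ _ h1, h2]

theorem length_nswap (l : List Int) (i : Nat) : (nswap l i).length = l.length := by
  simp [nswap]

theorem nswap_getD (l : List Int) (i : Nat) (hi : i + 1 < l.length) (k : Nat) :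
    (nswap l i).getD k 0 =
      if k = i then l.getD (i+1) 0 else if k = i+1 then l.getD i 0 else l.getD k 0 := by
  simp only [nswap, List.getD_eq_getElem?_getD, List.getElem?_set, List.length_set]
  rcases eq_or_ne k i with rfl | hki
  · rw [if_neg (by omega), if_pos rfl, if_pos (by omega), if_pos rfl]; simp
  · rcases eq_or_ne k (i+1) with rfl | hki1
    · rw [if_pos rfl, if_pos (by omega), if_neg (by omega), if_pos rfl]; simp
    · rw [if_neg (by omega), if_neg (by omega), if_neg (by omega), if_neg (by omega)]

theorem ndouble_getD (A : List Int) (i j : Nat) (hij : i < j) (hj : j + 1 < A.length) (k : Nat) :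
    (ndouble A i j).getD k 0 =
      if k = i then A.getD (i+1) 0
      else if k = j then A.getD (j+1) 0
      else if k = j+1 then (if j = i+1 then A.getD i 0 else A.getD j 0)
      else if k = i+1 then A.getD i 0
      else A.getD k 0 := by
  have hi : i + 1 < A.length := by omega
  have hj' : j + 1 < (nswap A i).length := by rw [length_nswap]; omega
  rw [ndouble, nswap_getD _ _ hj' k]
  rw [nswap_getD _ _ hi (j+1), nswap_getD _ _ hi j, nswap_getD _ _ hi k]
  split_ifs <;> first | rfl | omega

theorem eq_iff_getD (l1 l2 : List Int) (h : l1.length = l2.length) :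
    l1 = l2 ↔ ∀ k : Nat, k < l1.length → l1.getD k 0 = l2.getD k 0 := by
  constructor
  · intro he k _; rw [he]
  · intro hk
    apply List.ext_getElem h
    intro i h1 h2
    have := hk i h1
    rwa [List.getD_eq_getElem _ _ h1, List.getD_eq_getElem _ _ h2] at this

theorem nswap_perm (l : List Int) (i : Nat) (h : i + 1 < l.length) : (nswap l i).Perm l := by
  induction l generalizing i with
  | nil => simp at h
  | cons a t ih =>
    cases i with
    | zero =>
      cases t with
      | nil => simp at h
      | cons b t' => simp [nswap]; exact List.Perm.swap a b t'
    | succ i' =>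
      have he : nswap (a :: t) (i' + 1) = a :: nswap t i' := by
        simp [nswap, List.set_cons_succ]
      rw [he]
      exact (ih i' (by simpa using h)).cons a

theorem nswap_noop (A : List Int) (i : Nat) (hlen : i + 1 < A.length)
    (hval : A.getD i 0 = A.getD (i+1) 0) : nswap A i = A := by
  rw [eq_iff_getD _ _ (length_nswap A i)]
  intro k hk
  rw [length_nswap] at hk
  rw [nswap_getD _ _ hlen k]
  split_ifs with h1 h2
  · rw [h1, hval]
  · rw [h2, hval]
  · rfl

theorem good_perm (A B : List Int) (M : Nat) (hM : M ≤ A.length) (i j : Nat)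
    (h : pvGoodN A B M i j) : A.Perm B := by
  obtain ⟨hij, hj, he⟩ := h
  have h1 : (nswap A i).Perm A := nswap_perm A i (by omega)
  have h2 : (nswap (nswap A i) j).Perm (nswap A i) := nswap_perm _ j (by rw [length_nswap]; omega)
  have : (ndouble A i j).Perm A := h2.trans h1
  rw [he] at this
  exact this.symm

theorem good_diff_subset (A B : List Int) (M : Nat) (hM : M ≤ A.length) (i j : Nat)
    (h : pvGoodN A B M i j)
    (k : Nat) (hd : A.getD k 0 ≠ B.getD k 0) :
    k = i ∨ k = i+1 ∨ k = j ∨ k = j+1 := by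
  obtain ⟨hij, hj', he⟩ := h
  have hj : j + 1 < A.length := by omega
  by_contra hc
  rw [not_or, not_or, not_or] at hc
  obtain ⟨n1, n2, n3, n4⟩ := hc
  apply hd
  rw [← he, ndouble_getD A i j hij hj k, if_neg n1, if_neg n3, if_neg n4, if_neg n2]

-- THE CORE: a successful pair of swaps can be replaced by one whose positions are near
-- a differing index or are the least/greatest no-op positions
theorem confine (A B : List Int) (hlen : B.length = A.length) (M : Nat)
    (hM : M ≤ A.length) (i j : Nat) (h : pvGoodN A B M i j) :
    ∃ i' j', pvGoodN A B M i' j' ∧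
      (pvNearD A B M i' ∨ (pvNp A M i' ∧ ∀ q, pvNp A M q → i' ≤ q)) ∧
      (pvNearD A B M j' ∨ (pvNp A M j' ∧ ∀ p, pvNp A M p → p ≤ j')) := by
  obtain ⟨hij, hjn, heq⟩ := h
  have hjA : j + 1 < A.length := by omega
  have hi1 : i + 1 < A.length := by omega
  haveI : DecidablePred (pvNp A M) := fun k => by unfold pvNp; infer_instance
  have hval : ∀ k : Nat, B.getD k 0 =
      (if k = i then A.getD (i+1) 0
       else if k = j then A.getD (j+1) 0
       else if k = j+1 then (if j = i+1 then A.getD i 0 else A.getD j 0)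
       else if k = i+1 then A.getD i 0
       else A.getD k 0) := by
    intro k; rw [← heq]; exact ndouble_getD A i j hij hjA k
  have ri : B.getD i 0 = A.getD (i+1) 0 := by
    rw [hval i, if_pos rfl]
  have rj : B.getD j 0 = A.getD (j+1) 0 := by
    rw [hval j, if_neg (by omega), if_pos rfl]
  have rj1 : B.getD (j+1) 0 = (if j = i+1 then A.getD i 0 else A.getD j 0) := by
    rw [hval (j+1), if_neg (by omega), if_neg (by omega), if_pos rfl]
  have rout : ∀ k, k ≠ i → k ≠ i+1 → k ≠ j → k ≠ j+1 → B.getD k 0 = A.getD k 0 := by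
    intro k h1 h2 h3 h4
    rw [hval k, if_neg h1, if_neg h3, if_neg h4, if_neg h2]
  by_cases cTi : A.getD i 0 = B.getD i 0 ∧ A.getD (i+1) 0 = B.getD (i+1) 0
  · have hNpi : pvNp A M i := ⟨by omega, by rw [cTi.1, ri]⟩
    have hex : ∃ k, pvNp A M k := ⟨i, hNpi⟩
    have hp : pvNp A M (Nat.find hex) := Nat.find_spec hex
    have hpi : Nat.find hex ≤ i := Nat.find_min' hex hNpi
    by_cases cTj : A.getD j 0 = B.getD j 0 ∧ A.getD (j+1) 0 = B.getD (j+1) 0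
    · -- both swaps are no-ops: A = B; take the least and greatest no-op positions
      have hNpj : pvNp A M j := ⟨hjn, by rw [cTj.1, rj]⟩
      have hAB : A = B := by
        rw [eq_iff_getD A B hlen.symm]
        intro k hk
        rcases eq_or_ne k i with rfl | k1
        · exact cTi.1
        rcases eq_or_ne k (i+1) with rfl | k2
        · exact cTi.2
        rcases eq_or_ne k j with rfl | k3
        · exact cTj.1
        rcases eq_or_ne k (j+1) with rfl | k4
        · exact cTj.2
        exact (rout k k1 k2 k3 k4).symm
      have hqs : pvNp A M (Nat.findGreatest (pvNp A M) M) :=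
        Nat.findGreatest_spec (by omega) hNpj
      have hjq : j ≤ Nat.findGreatest (pvNp A M) M :=
        Nat.le_findGreatest (by omega) hNpj
      refine ⟨Nat.find hex, Nat.findGreatest (pvNp A M) M,
        ⟨by omega, by have := hqs.1; omega, ?_⟩,
        Or.inr ⟨hp, fun q hq => Nat.find_min' hex hq⟩,
        Or.inr ⟨hqs, fun p' hp' => Nat.le_findGreatest (by have := hp'.1; omega) hp'⟩⟩
      rw [ndouble, nswap_noop A _ (by have := hp.1; omega) hp.2,
        nswap_noop A _ (by have := hqs.1; omega) hqs.2]
      exact hAB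
    · -- only j's swap is effective: B = swap A j; pair it with the least no-op position
      have hov : j ≠ i + 1 := by
        intro hov
        apply cTj
        constructor
        · rw [hov]; exact cTi.2
        · have h1 : A.getD (j+1) 0 = A.getD (i+1) 0 := by rw [← rj, hov]; exact cTi.2.symm
          have h2 : B.getD (j+1) 0 = A.getD i 0 := by rw [rj1, if_pos hov]
          exact h1.trans (hNpi.2.symm.trans h2.symm)
      have hBeq : nswap A j = B := by
        rw [eq_iff_getD _ _ (by rw [length_nswap, hlen])]
        intro k hk
        rw [length_nswap] at hk
        rw [nswap_getD A j hjA k]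
        rcases eq_or_ne k j with rfl | k3
        · rw [if_pos rfl]; exact rj.symm
        rcases eq_or_ne k (j+1) with rfl | k4
        · rw [if_neg k3, if_pos rfl]
          have h5 := rj1; rw [if_neg hov] at h5; exact h5.symm
        rw [if_neg k3, if_neg k4]
        rcases eq_or_ne k i with rfl | k1
        · exact cTi.1
        rcases eq_or_ne k (i+1) with rfl | k2
        · exact cTi.2
        exact (rout k k1 k2 k3 k4).symm
      refine ⟨Nat.find hex, j, ⟨by omega, hjn, ?_⟩,
        Or.inr ⟨hp, fun q hq => Nat.find_min' hex hq⟩, Or.inl ?_⟩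
      · rw [ndouble, nswap_noop A _ (by have := hp.1; omega) hp.2]
        exact hBeq
      · rcases not_and_or.mp cTj with hd | hd
        · exact ⟨j, by omega, hd, by omega, by omega⟩
        · exact ⟨j+1, by omega, hd, by omega, by omega⟩
  · by_cases cTj : A.getD j 0 = B.getD j 0 ∧ A.getD (j+1) 0 = B.getD (j+1) 0
    · -- only i's swap is effective: B = swap A i; pair it with the greatest no-op position
      have hNpj : pvNp A M j := ⟨hjn, by rw [cTj.1, rj]⟩
      have hov : j ≠ i + 1 := by
        intro hov
        apply cTi
        have e2 : B.getD (j+1) 0 = A.getD i 0 := by rw [rj1, if_pos hov]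
        have e3 : A.getD (j+1) 0 = A.getD i 0 := cTj.2.trans e2
        constructor
        · have h1 : A.getD i 0 = A.getD (i+1) 0 := by rw [← e3, ← hNpj.2, hov]
          rw [h1, ← ri]
        · rw [← hov]; exact cTj.1
      have ri1 : B.getD (i+1) 0 = A.getD i 0 := by
        rw [hval (i+1), if_neg (by omega), if_neg (by omega), if_neg (by omega), if_pos rfl]
      have hBeq : nswap A i = B := by
        rw [eq_iff_getD _ _ (by rw [length_nswap, hlen])]
        intro k hk
        rw [length_nswap] at hk
        rw [nswap_getD A i hi1 k]
        rcases eq_or_ne k i with rfl | k1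
        · rw [if_pos rfl]; exact ri.symm
        rcases eq_or_ne k (i+1) with rfl | k2
        · rw [if_neg k1, if_pos rfl]; exact ri1.symm
        rw [if_neg k1, if_neg k2]
        rcases eq_or_ne k j with rfl | k3
        · exact cTj.1
        rcases eq_or_ne k (j+1) with rfl | k4
        · exact cTj.2
        exact (rout k k1 k2 k3 k4).symm
      have hqs : pvNp A M (Nat.findGreatest (pvNp A M) M) :=
        Nat.findGreatest_spec (by omega) hNpj
      have hjq : j ≤ Nat.findGreatest (pvNp A M) M :=
        Nat.le_findGreatest (by omega) hNpj
      have hqB : B.getD (Nat.findGreatest (pvNp A M) M) 0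
          = B.getD (Nat.findGreatest (pvNp A M) M + 1) 0 := by
        have h1 : B.getD (Nat.findGreatest (pvNp A M) M) 0
            = A.getD (Nat.findGreatest (pvNp A M) M) 0 := by
          rw [← hBeq, nswap_getD A i hi1, if_neg (by omega), if_neg (by omega)]
        have h2 : B.getD (Nat.findGreatest (pvNp A M) M + 1) 0
            = A.getD (Nat.findGreatest (pvNp A M) M + 1) 0 := by
          rw [← hBeq, nswap_getD A i hi1, if_neg (by omega), if_neg (by omega)]
        rw [h1, h2]; exact hqs.2
      refine ⟨i, Nat.findGreatest (pvNp A M) M,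
        ⟨by omega, by have := hqs.1; omega, ?_⟩, Or.inl ?_,
        Or.inr ⟨hqs, fun p' hp' => Nat.le_findGreatest (by have := hp'.1; omega) hp'⟩⟩
      · rw [ndouble, hBeq]
        exact nswap_noop B _ (by have := hqs.1; omega) hqB
      · rcases not_and_or.mp cTi with hd | hd
        · exact ⟨i, by omega, hd, by omega, by omega⟩
        · exact ⟨i+1, by omega, hd, by omega, by omega⟩
    · -- both swaps touch differing indices: the pair itself is confined
      refine ⟨i, j, ⟨hij, hjn, heq⟩, Or.inl ?_, Or.inl ?_⟩
      · rcases not_and_or.mp cTi with hd | hd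
        · exact ⟨i, by omega, hd, by omega, by omega⟩
        · exact ⟨i+1, by omega, hd, by omega, by omega⟩
      · rcases not_and_or.mp cTj with hd | hd
        · exact ⟨j, by omega, hd, by omega, by omega⟩
        · exact ⟨j+1, by omega, hd, by omega, by omega⟩

-- ---- port-link layer: name the lists the two ports build ----

def pvDiffs (N : Int) (A B : List Int) : List Int :=
  (PySem.List.pyRange 0 N 1).filter
    (fun i => !(PySem.List.pyGetD A i 0 == PySem.List.pyGetD B i 0))

def pvNoops (N : Int) (A : List Int) : List Int :=
  (PySem.List.pyRange 0 (N-1) 1).filter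
    (fun i => PySem.List.pyGetD A i 0 == PySem.List.pyGetD A (i+1) 0)

def pvCand0 (N : Int) (A B : List Int) : PySem.Set Int :=
  (pvDiffs N A B).foldl (fun s d =>
      (PySem.List.pyRange (d-2) (d+3) 1).foldl (fun s k =>
         if 0 ≤ k ∧ k ≤ N-2 then PySem.Set.add s k else s) s) PySem.Set.empty

def pvCand1 (N : Int) (A B : List Int) : PySem.Set Int :=
  match pvNoops N A with
  | [] => pvCand0 N A B
  | h :: _ => PySem.Set.add (PySem.Set.add (pvCand0 N A B) h)
      (PySem.List.pyGetD (pvNoops N A) (-1) 0)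

def pvCand (N : Int) (A B : List Int) : List Int :=
  PySem.List.sorted (pvCand1 N A B) (fun x => x) false

def pvE (A B : List Int) (M : Nat) : Prop := ∃ i j, pvGoodN A B M i j

theorem a_eq (N : Int) (A B : List Int) : can_match_with_two_swaps N A B =
    (if ¬ A.Perm B then "No"
     else if (pvDiffs N A B).length > 4 then "No"
     else if (PySem.List.pyRange 0 (N-1) 1).any (fun i =>
           (PySem.List.pyRange (i+1) (N-1) 1).any (fun j => pvTry A B i j))
      then "Yes" else "No") := rfl

theorem altB_eq (N : Int) (A B : List Int) : can_match_with_two_swaps_alt N A B =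
    (if ¬ (PySem.List.sorted A (fun x => x) false = PySem.List.sorted B (fun x => x) false) then "No"
     else if (pvDiffs N A B).length > 4 then "No"
     else if (PySem.List.pyRange 0 ((pvCand N A B).length : Int) 1).any (fun x =>
        (PySem.List.pyRange (x+1) ((pvCand N A B).length : Int) 1).any (fun y =>
          pvTry A B (PySem.List.pyGetD (pvCand N A B) x 0) (PySem.List.pyGetD (pvCand N A B) y 0)))
      then "Yes" else "No") := rfl

theorem mem_pvDiffs (N : Int) (A B : List Int) (x : Int) :
    x ∈ pvDiffs N A B ↔ 0 ≤ x ∧ x < N ∧ A.getD x.toNat 0 ≠ B.getD x.toNat 0 := by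
  simp only [pvDiffs, List.mem_filter, PySem.List.mem_pyRange_one, Bool.not_eq_true',
    beq_eq_false_iff_ne, ne_eq]
  constructor
  · rintro ⟨⟨h0, h1⟩, h2⟩
    rw [PySem.List.pyGetD_of_nonneg _ _ h0, PySem.List.pyGetD_of_nonneg _ _ h0] at h2
    exact ⟨h0, h1, h2⟩
  · rintro ⟨h0, h1, h2⟩
    refine ⟨⟨h0, h1⟩, ?_⟩
    rw [PySem.List.pyGetD_of_nonneg _ _ h0, PySem.List.pyGetD_of_nonneg _ _ h0]
    exact h2

theorem mem_pvNoops (N : Int) (A : List Int) (x : Int) :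
    x ∈ pvNoops N A ↔ 0 ≤ x ∧ x + 1 < N ∧ A.getD x.toNat 0 = A.getD (x.toNat + 1) 0 := by
  simp only [pvNoops, List.mem_filter, PySem.List.mem_pyRange_one, beq_iff_eq]
  constructor
  · rintro ⟨⟨h0, h1⟩, h2⟩
    rw [PySem.List.pyGetD_of_nonneg _ _ h0, PySem.List.pyGetD_of_nonneg _ _ (by omega : (0:Int) ≤ x + 1)] at h2
    refine ⟨h0, by omega, ?_⟩
    have : (x + 1).toNat = x.toNat + 1 := by omega
    rwa [this] at h2
  · rintro ⟨h0, h1, h2⟩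
    refine ⟨⟨h0, by omega⟩, ?_⟩
    rw [PySem.List.pyGetD_of_nonneg _ _ h0, PySem.List.pyGetD_of_nonneg _ _ (by omega : (0:Int) ≤ x + 1)]
    have : (x + 1).toNat = x.toNat + 1 := by omega
    rwa [this]

theorem mem_pvNoops_iff_pvNp (N : Int) (A : List Int) (x : Int) :
    x ∈ pvNoops N A ↔ 0 ≤ x ∧ pvNp A N.toNat x.toNat := by
  rw [mem_pvNoops]
  unfold pvNp
  constructor
  · rintro ⟨h0, h1, h2⟩; exact ⟨h0, by omega, h2⟩
  · rintro ⟨h0, h1, h2⟩; exact ⟨h0, by omega, h2⟩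

theorem pvNoops_pairwise (N : Int) (A : List Int) : (pvNoops N A).Pairwise (· < ·) :=
  (PySem.List.pairwise_lt_pyRange_one _ _).filter _

theorem pvTry_iff (A B : List Int) (i j : Int) (h0 : 0 ≤ i) (h1 : 0 ≤ j) :
    pvTry A B i j = true ↔ ndouble A i.toNat j.toNat = B := by
  rw [pvTry, pvSwap_eq_nswap _ _ h0, pvSwap_eq_nswap _ _ h1, beq_iff_eq, ndouble]

theorem diffs_le_four (N : Int) (A B : List Int) (hM : N.toNat ≤ A.length)
    (i j : Nat) (h : pvGoodN A B N.toNat i j) : (pvDiffs N A B).length ≤ 4 := by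
  have hsub : pvDiffs N A B ⊆ [(i:Int), (i:Int)+1, (j:Int), (j:Int)+1] := by
    intro x hx
    rw [mem_pvDiffs] at hx
    obtain ⟨h0, h1, h2⟩ := hx
    have hc := good_diff_subset A B N.toNat hM i j h x.toNat h2
    simp only [List.mem_cons, List.not_mem_nil, or_false]
    omega
  have hnd : (pvDiffs N A B).Nodup := (PySem.List.nodup_pyRange_one 0 N).filter _
  have := (hnd.subperm hsub).length_le
  simpa using this

theorem anyA_iff (N : Int) (A B : List Int) :
    ((PySem.List.pyRange 0 (N-1) 1).any (fun i =>
      (PySem.List.pyRange (i+1) (N-1) 1).any (fun j => pvTry A B i j)) = true) ↔ pvE A B N.toNat := by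
  simp only [List.any_eq_true, PySem.List.mem_pyRange_one]
  constructor
  · rintro ⟨i, ⟨hi0, hi1⟩, j, ⟨hj0, hj1⟩, htry⟩
    rw [pvTry_iff A B i j hi0 (by omega)] at htry
    exact ⟨i.toNat, j.toNat, by omega, by omega, htry⟩
  · rintro ⟨i, j, hij, hjn, heq⟩
    refine ⟨(i:Int), ⟨by omega, by omega⟩, (j:Int), ⟨by omega, by omega⟩, ?_⟩
    rw [pvTry_iff A B _ _ (by omega) (by omega)]
    simpa using heq

theorem mem_foldl_addif (l : List Int) (p : Int → Prop) [DecidablePred p]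
    (s : PySem.Set Int) (x : Int) :
    (x ∈ l.foldl (fun s k => if p k then PySem.Set.add s k else s) s) ↔
      x ∈ s ∨ (x ∈ l ∧ p x) := by
  induction l generalizing s with
  | nil => simp
  | cons a t ih =>
    rw [List.foldl_cons, ih]
    by_cases hpa : p a
    · rw [if_pos hpa, PySem.Set.mem_add]
      constructor
      · rintro ((h | rfl) | ⟨ht, hp⟩)
        · exact Or.inl h
        · exact Or.inr ⟨List.mem_cons_self, hpa⟩
        · exact Or.inr ⟨List.mem_cons_of_mem a ht, hp⟩
      · rintro (h | ⟨hm, hp⟩)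
        · exact Or.inl (Or.inl h)
        · rcases List.mem_cons.mp hm with rfl | ht
          · exact Or.inl (Or.inr rfl)
          · exact Or.inr ⟨ht, hp⟩
    · rw [if_neg hpa]
      constructor
      · rintro (h | ⟨ht, hp⟩)
        · exact Or.inl h
        · exact Or.inr ⟨List.mem_cons_of_mem a ht, hp⟩
      · rintro (h | ⟨hm, hp⟩)
        · exact Or.inl h
        · rcases List.mem_cons.mp hm with rfl | ht
          · exact absurd hp hpa
          · exact Or.inr ⟨ht, hp⟩

theorem nodup_foldl_addif (l : List Int) (p : Int → Prop) [DecidablePred p]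
    (s : PySem.Set Int) (h : List.Nodup s) :
    List.Nodup (l.foldl (fun s k => if p k then PySem.Set.add s k else s) s) := by
  induction l generalizing s with
  | nil => exact h
  | cons a t ih =>
    rw [List.foldl_cons]
    by_cases hpa : p a
    · rw [if_pos hpa]; exact ih _ (PySem.Set.nodup_add s a h)
    · rw [if_neg hpa]; exact ih _ h

theorem mem_pvCand0_core (ds : List Int) (N : Int) (s : PySem.Set Int) (x : Int) :
    (x ∈ ds.foldl (fun s d => (PySem.List.pyRange (d-2) (d+3) 1).foldl (fun s k =>
        if 0 ≤ k ∧ k ≤ N-2 then PySem.Set.add s k else s) s) s) ↔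
      x ∈ s ∨ ∃ d ∈ ds, d-2 ≤ x ∧ x < d+3 ∧ 0 ≤ x ∧ x ≤ N-2 := by
  induction ds generalizing s with
  | nil => simp
  | cons a t ih =>
    rw [List.foldl_cons, ih, mem_foldl_addif _ (fun k => 0 ≤ k ∧ k ≤ N-2)]
    simp only [PySem.List.mem_pyRange_one, List.mem_cons]
    constructor
    · rintro ((h | ⟨⟨hr1, hr2⟩, hb1, hb2⟩) | ⟨d, hd, hc⟩)
      · exact Or.inl h
      · exact Or.inr ⟨a, Or.inl rfl, hr1, hr2, hb1, hb2⟩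
      · exact Or.inr ⟨d, Or.inr hd, hc⟩
    · rintro (h | ⟨d, (rfl | hd), hc⟩)
      · exact Or.inl (Or.inl h)
      · exact Or.inl (Or.inr ⟨⟨hc.1, hc.2.1⟩, hc.2.2.1, hc.2.2.2⟩)
      · exact Or.inr ⟨d, hd, hc⟩

theorem mem_pvCand0 (N : Int) (A B : List Int) (x : Int) :
    x ∈ pvCand0 N A B ↔
      ∃ d ∈ pvDiffs N A B, d-2 ≤ x ∧ x < d+3 ∧ 0 ≤ x ∧ x ≤ N-2 := by
  rw [pvCand0, mem_pvCand0_core]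
  simp [PySem.Set.empty]

theorem nodup_pvCand0_core (ds : List Int) (N : Int) (s : PySem.Set Int) (h : List.Nodup s) :
    List.Nodup (ds.foldl (fun s d => (PySem.List.pyRange (d-2) (d+3) 1).foldl (fun s k =>
        if 0 ≤ k ∧ k ≤ N-2 then PySem.Set.add s k else s) s) s) := by
  induction ds generalizing s with
  | nil => exact h
  | cons a t ih =>
    rw [List.foldl_cons]
    exact ih _ (nodup_foldl_addif _ (fun k => 0 ≤ k ∧ k ≤ N-2) _ h)

theorem nodup_pvCand0 (N : Int) (A B : List Int) : List.Nodup (pvCand0 N A B) :=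
  nodup_pvCand0_core _ _ _ List.nodup_nil

theorem mem_pvCand1 (N : Int) (A B : List Int) (x : Int) :
    x ∈ pvCand1 N A B ↔ x ∈ pvCand0 N A B ∨
      (pvNoops N A).head? = some x ∨ (pvNoops N A).getLast? = some x := by
  cases hno : pvNoops N A with
  | nil => simp [pvCand1, hno]
  | cons h t =>
    have hne : h :: t ≠ [] := by simp
    rw [pvCand1, hno]
    rw [PySem.Set.mem_add, PySem.Set.mem_add]
    rw [PySem.List.pyGetD_neg_one _ _ hne]
    simp only [List.head?_cons, List.getLast?_eq_some_getLast hne, Option.some.injEq]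
    constructor
    · rintro ((h1 | h2) | h3)
      · exact Or.inl h1
      · exact Or.inr (Or.inl h2.symm)
      · exact Or.inr (Or.inr h3.symm)
    · rintro (h1 | h2 | h3)
      · exact Or.inl (Or.inl h1)
      · exact Or.inl (Or.inr h2.symm)
      · exact Or.inr h3.symm

theorem nodup_pvCand1 (N : Int) (A B : List Int) : List.Nodup (pvCand1 N A B) := by
  rw [pvCand1]
  cases pvNoops N A with
  | nil => exact nodup_pvCand0 N A B
  | cons h t =>
    exact PySem.Set.nodup_add _ _ (PySem.Set.nodup_add _ _ (nodup_pvCand0 N A B))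

theorem pvCand_pairwise (N : Int) (A B : List Int) : (pvCand N A B).Pairwise (· < ·) := by
  have hle : (pvCand N A B).Pairwise (· ≤ ·) := by
    unfold pvCand
    simpa using PySem.List.sorted_pairwise (pvCand1 N A B) (fun x : Int => x)
  have hnd : (pvCand N A B).Nodup := by
    unfold pvCand
    exact ((PySem.List.sorted_perm (pvCand1 N A B) (fun x : Int => x) false).nodup_iff).mpr
      (nodup_pvCand1 N A B)
  have hnd' : (pvCand N A B).Pairwise (fun a b => a ≠ b) := hnd
  rw [List.pairwise_iff_getElem] at hle hnd' ⊢
  intro a b ha hb hab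
  exact lt_of_le_of_ne (hle a b ha hb hab) (hnd' a b ha hb hab)

theorem mem_pvCand (N : Int) (A B : List Int) (x : Int) :
    x ∈ pvCand N A B ↔ x ∈ pvCand1 N A B :=
  PySem.List.mem_sorted _ _ _ _

theorem cand1_bounds (N : Int) (A B : List Int) (x : Int) (hx : x ∈ pvCand1 N A B) :
    0 ≤ x ∧ x ≤ N - 2 := by
  rw [mem_pvCand1] at hx
  rcases hx with h | h | h
  · rw [mem_pvCand0] at h
    obtain ⟨d, _, _, _, hb⟩ := h
    omega
  · have hm : x ∈ pvNoops N A := by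
      cases hno : pvNoops N A with
      | nil => rw [hno] at h; simp at h
      | cons a t =>
        rw [hno] at h; simp at h
        rw [h]; exact List.mem_cons_self
    rw [mem_pvNoops] at hm
    omega
  · have hne : pvNoops N A ≠ [] := by
      intro hc; rw [hc] at h; simp at h
    have hm : x ∈ pvNoops N A := by
      rw [List.getLast?_eq_some_getLast hne] at h
      rw [← Option.some_inj.mp h]
      exact List.getLast_mem hne
    rw [mem_pvNoops] at hm
    omega

theorem anyB_iff (N : Int) (A B : List Int) :
    ((PySem.List.pyRange 0 ((pvCand N A B).length : Int) 1).any (fun x =>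
        (PySem.List.pyRange (x+1) ((pvCand N A B).length : Int) 1).any (fun y =>
          pvTry A B (PySem.List.pyGetD (pvCand N A B) x 0)
            (PySem.List.pyGetD (pvCand N A B) y 0))) = true) ↔
      ∃ u v : Int, u ∈ pvCand1 N A B ∧ v ∈ pvCand1 N A B ∧ u < v ∧ pvTry A B u v = true := by
  have hpw := pvCand_pairwise N A B
  rw [List.pairwise_iff_getElem] at hpw
  simp only [List.any_eq_true, PySem.List.mem_pyRange_one]
  constructor
  · rintro ⟨x, ⟨hx0, hx1⟩, y, ⟨hy0, hy1⟩, ht⟩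
    have hxn : x.toNat < (pvCand N A B).length := by omega
    have hyn : y.toNat < (pvCand N A B).length := by omega
    rw [PySem.List.pyGetD_eq_getElem _ _ hx0 hx1, PySem.List.pyGetD_eq_getElem _ _ (by omega) hy1] at ht
    refine ⟨(pvCand N A B)[x.toNat], (pvCand N A B)[y.toNat], ?_, ?_, ?_, ht⟩
    · exact (mem_pvCand N A B _).mp (List.getElem_mem hxn)
    · exact (mem_pvCand N A B _).mp (List.getElem_mem hyn)
    · exact hpw x.toNat y.toNat hxn hyn (by omega)
  · rintro ⟨u, v, hu, hv, huv, ht⟩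
    obtain ⟨x, hx, hxe⟩ := List.mem_iff_getElem.mp ((mem_pvCand N A B u).mpr hu)
    obtain ⟨y, hy, hye⟩ := List.mem_iff_getElem.mp ((mem_pvCand N A B v).mpr hv)
    have hxy : x < y := by
      rcases lt_trichotomy x y with hlt | heq | hgt
      · exact hlt
      · exfalso; subst heq; have := hxe.symm.trans hye; omega
      · exfalso
        have := hpw y x hy hx hgt
        rw [hxe, hye] at this
        omega
    refine ⟨(x : Int), ⟨by omega, by omega⟩, (y : Int), ⟨by omega, by omega⟩, ?_⟩
    rw [PySem.List.pyGetD_eq_getElem _ _ (by omega) (by exact_mod_cast hx),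
      PySem.List.pyGetD_eq_getElem _ _ (by omega) (by exact_mod_cast hy)]
    simp only [Int.toNat_natCast]
    rw [hxe, hye]
    exact ht

theorem cand_to_E (N : Int) (A B : List Int)
    (u v : Int) (hu : u ∈ pvCand1 N A B) (hv : v ∈ pvCand1 N A B)
    (huv : u < v) (ht : pvTry A B u v = true) : pvE A B N.toNat := by
  obtain ⟨hu0, hu2⟩ := cand1_bounds N A B u hu
  obtain ⟨hv0, hv2⟩ := cand1_bounds N A B v hv
  rw [pvTry_iff A B u v hu0 hv0] at ht
  exact ⟨u.toNat, v.toNat, by omega, by omega, ht⟩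

theorem E_to_cand (N : Int) (A B : List Int) (hM : N.toNat ≤ A.length)
    (hBl : B.length = A.length) (hE : pvE A B N.toNat) :
    ∃ u v : Int, u ∈ pvCand1 N A B ∧ v ∈ pvCand1 N A B ∧ u < v ∧ pvTry A B u v = true := by
  obtain ⟨i0, j0, h0⟩ := hE
  obtain ⟨i, j, hg, hiC, hjC⟩ := confine A B hBl N.toNat hM i0 j0 h0
  obtain ⟨hij, hjn, heq⟩ := hg
  have hmemNoop : ∀ k : Nat, pvNp A N.toNat k → ((k : Int) ∈ pvNoops N A) := by
    intro k hk
    rw [mem_pvNoops_iff_pvNp N A]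
    simpa using hk
  have hhead : ∀ k : Nat, (pvNp A N.toNat k ∧ ∀ q, pvNp A N.toNat q → k ≤ q) →
      (pvNoops N A).head? = some (k : Int) := by
    rintro k ⟨hk, hmin⟩
    have hkm := hmemNoop k hk
    cases hno : pvNoops N A with
    | nil => rw [hno] at hkm; simp at hkm
    | cons a t =>
      rw [hno] at hkm
      have hpw := pvNoops_pairwise N A
      rw [hno] at hpw
      rcases List.mem_cons.mp hkm with heq' | hmem
      · rw [← heq']; rfl
      · exfalso
        have halt : a < (k : Int) := (List.pairwise_cons.mp hpw).1 _ hmem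
        have haN : a ∈ pvNoops N A := by rw [hno]; exact List.mem_cons_self
        rw [mem_pvNoops_iff_pvNp N A] at haN
        have := hmin a.toNat haN.2
        omega
  have hlast : ∀ k : Nat, (pvNp A N.toNat k ∧ ∀ p, pvNp A N.toNat p → p ≤ k) →
      (pvNoops N A).getLast? = some (k : Int) := by
    rintro k ⟨hk, hmax⟩
    have hkm := hmemNoop k hk
    have hne : pvNoops N A ≠ [] := by intro hc; rw [hc] at hkm; simp at hkm
    rw [List.getLast?_eq_some_getLast hne]
    have hgm : (pvNoops N A).getLast hne ∈ pvNoops N A := List.getLast_mem hne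
    have hgN := hgm
    rw [mem_pvNoops_iff_pvNp N A] at hgN
    have h1 := hmax _ hgN.2
    -- k ≤ getLast (as it is a noop), and getLast is the maximum of the list
    have h2 : ∀ x ∈ pvNoops N A, x ≤ (pvNoops N A).getLast hne := by
      intro x hx
      have hpw := pvNoops_pairwise N A
      obtain ⟨xi, hxi, hxe⟩ := List.mem_iff_getElem.mp hx
      rw [List.getLast_eq_getElem]
      rw [List.pairwise_iff_getElem] at hpw
      rcases Nat.lt_or_ge xi ((pvNoops N A).length - 1) with hlt | hge
      · exact le_of_lt (hxe ▸ hpw xi _ hxi (by omega) hlt)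
      · have : xi = (pvNoops N A).length - 1 := by
          have := hxi; omega
        subst this
        rw [hxe]
    have h3 := h2 _ hkm
    have h4 : ((pvNoops N A).getLast hne) = (k : Int) := by
      have hg0 : 0 ≤ (pvNoops N A).getLast hne := by
        rw [mem_pvNoops] at hgm; omega
      omega
    rw [h4]
  have hmemD : ∀ k : Nat, pvNearD A B N.toNat k → (k : Int) ≤ N - 2 → ((k : Int) ∈ pvCand1 N A B) := by
    rintro k ⟨d, hd1, hd2, hd3, hd4⟩ hk2
    rw [mem_pvCand1]
    left
    rw [mem_pvCand0]
    refine ⟨(d : Int), ?_, by omega, by omega, by omega, by omega⟩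
    rw [mem_pvDiffs]
    refine ⟨by omega, by omega, ?_⟩
    simpa using hd2
  have hbnd : (i : Int) ≤ N - 2 ∧ (j : Int) ≤ N - 2 := by omega
  have hiM : (i : Int) ∈ pvCand1 N A B := by
    rcases hiC with hnear | hmin
    · exact hmemD i hnear hbnd.1
    · rw [mem_pvCand1]
      right; left
      exact hhead i hmin
  have hjM : (j : Int) ∈ pvCand1 N A B := by
    rcases hjC with hnear | hmax
    · exact hmemD j hnear hbnd.2
    · rw [mem_pvCand1]
      right; right
      exact hlast j hmax
  refine ⟨(i : Int), (j : Int), hiM, hjM, by omega, ?_⟩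
  rw [pvTry_iff A B _ _ (by omega) (by omega)]
  simpa using heq

theorem portA_yes (N : Int) (A B : List Int) (hM : N.toNat ≤ A.length)
    (hE : pvE A B N.toNat) : can_match_with_two_swaps N A B = "Yes" := by
  obtain ⟨i, j, hg⟩ := hE
  rw [a_eq, if_neg (not_not.mpr (good_perm A B N.toNat hM i j hg)),
    if_neg (by have := diffs_le_four N A B hM i j hg; omega),
    if_pos ((anyA_iff N A B).mpr ⟨i, j, hg⟩)]

theorem portA_no (N : Int) (A B : List Int) (hE : ¬ pvE A B N.toNat) :
    can_match_with_two_swaps N A B = "No" := by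
  rw [a_eq]
  split_ifs with h1 h2 h3
  all_goals try rfl
  exact absurd ((anyA_iff N A B).mp h3) hE

theorem portB_yes (N : Int) (A B : List Int) (hM : N.toNat ≤ A.length)
    (hBl : B.length = A.length) (hE : pvE A B N.toNat) :
    can_match_with_two_swaps_alt N A B = "Yes" := by
  obtain ⟨i, j, hg⟩ := hE
  have hperm : A.Perm B := good_perm A B N.toNat hM i j hg
  rw [altB_eq,
    if_neg (not_not.mpr ((PySem.List.sorted_id_eq_sorted_id_iff_perm A B).mpr hperm)),
    if_neg (by have := diffs_le_four N A B hM i j hg; omega),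
    if_pos ((anyB_iff N A B).mpr (E_to_cand N A B hM hBl ⟨i, j, hg⟩))]

theorem portB_no (N : Int) (A B : List Int) (hE : ¬ pvE A B N.toNat) :
    can_match_with_two_swaps_alt N A B = "No" := by
  rw [altB_eq]
  split_ifs with h1 h2 h3
  all_goals try rfl
  obtain ⟨u, v, hu, hv, huv, ht⟩ := (anyB_iff N A B).mp h3
  exact absurd (cand_to_E N A B u v hu hv huv ht) hE

-- ===== VERDICT (by name: the statement is the Claim_ definition above) =====
theorem can_match_with_two_swaps_spec : Claim_equal_can_match_with_two_swaps := by
  intro N A B _hdom hpre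
  unfold Spec_can_match_with_two_swaps
  by_cases hperm : A.Perm B
  · have hM : N.toNat ≤ A.length := by
      rcases hpre with h | h
      · exact absurd hperm h
      · omega
    have hBl' : B.length = A.length := hperm.length_eq.symm
    by_cases hE : pvE A B N.toNat
    · rw [portA_yes N A B hM hE, portB_yes N A B hM hBl' hE]
    · rw [portA_no N A B hE, portB_no N A B hE]
  · rw [a_eq, if_pos hperm, altB_eq,
      if_pos (fun hc => hperm ((PySem.List.sorted_id_eq_sorted_id_iff_perm A B).mp hc))]
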